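-- pv_equiv track=rewrite | github.com/shrilakshmikakati/econtract-converter | src/postprocessor.py | _rewrite_negated_compound
-- ===== SOURCE A (Python) =====
-- def _rewrite_negated_compound(inner: str) -> str | None:
--     s = inner.strip()
--     parts: list[str] = []
--     operator: str | None = None
--     depth, current, i = 0, [], 0
--     while i < len(s):
--         ch = s[i]
--         if ch == '(':
--             depth += 1; current.append(ch)
--         elif ch == ')':
--             depth -= 1; current.append(ch)
--         elif depth == 0 and s[i:i+2] in ('||', '&&'):
--             op = s[i:i+2]
--             if operator is None:
--                 operator = op
--             elif operator != op:
--                 return None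
--             parts.append(''.join(current).strip())
--             current = []; i += 2; continue
--         else:
--             current.append(ch)
--         i += 1
--     parts.append(''.join(current).strip())
--     if len(parts) < 2 or operator is None:
--         return None
--     new_op = '&&' if operator == '||' else '||'
--     negated = [f'!({p})' if not p.startswith('!') else p[1:].strip('()') for p in parts]
--     return f' {new_op} '.join(negated)
-- ===== SOURCE B (Python) =====
-- def _rewrite_negated_compound(inner: str) -> str | None:
--     s = inner.strip()
--     n = len(s)
--     # first pass: record each top-level operator position
--     cuts: list[tuple[int, str]] = []
--     depth, i = 0, 0
--     while i < n:
--         ch = s[i]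
--         if ch == '(':
--             depth += 1
--         elif ch == ')':
--             depth -= 1
--         elif depth == 0 and s[i:i+2] in ('||', '&&'):
--             cuts.append((i, s[i:i+2]))
--             i += 2
--             continue
--         i += 1
--     ops = set(op for _, op in cuts)
--     if len(ops) != 1:
--         return None
--     operator = ops.pop()
--     # second phase: slice between consecutive boundaries
--     bounds = [-2] + [p for p, _ in cuts] + [n]
--     parts = [s[a + 2:b].strip() for a, b in zip(bounds, bounds[1:])]
--     new_op = '&&' if operator == '||' else '||'
--     negated = [f'!({p})' if not p.startswith('!') else p[1:].strip('()') for p in parts]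
--     return f' {new_op} '.join(negated)
-- ===== Notes on version B (the rewrite author's own statement) =====
-- stated objective: alternative
-- what changed: B replaces A's single loop that accumulates a per-part character buffer and validates the operator on the fly by two separate phases: a scan that records only the top-level operator positions, a distinct-operator set check, and a slicing pass that recovers the stripped parts from the recorded boundaries.
import Mathlib
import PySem

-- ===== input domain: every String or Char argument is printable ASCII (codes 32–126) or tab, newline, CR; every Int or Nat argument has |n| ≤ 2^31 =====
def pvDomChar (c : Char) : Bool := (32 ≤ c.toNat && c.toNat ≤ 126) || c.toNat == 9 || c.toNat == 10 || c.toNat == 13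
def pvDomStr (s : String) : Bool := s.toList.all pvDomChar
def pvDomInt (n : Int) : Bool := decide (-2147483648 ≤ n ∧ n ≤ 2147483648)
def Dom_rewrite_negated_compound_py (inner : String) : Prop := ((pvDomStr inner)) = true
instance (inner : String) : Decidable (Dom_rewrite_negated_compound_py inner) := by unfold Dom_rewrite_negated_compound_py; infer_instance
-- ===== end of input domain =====

-- B re-implements A by a different decomposition: one scan records only the top-level operator
-- positions (no per-character part buffer), validation uses the distinct-operator set, and the
-- parts are recovered afterwards by slicing between the recorded boundaries.

-- ===== PORT A =====
-- A's while-loop: depth tracking, a running 'current' buffer, parts appended at each top-level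
-- operator, early None on operator mismatch.
def pvA_loop : List Char → Int → List Char → List String → Option String →
    Option (List String × Option String)
  | [], _, current, parts, op => some (parts ++ [PySem.Str.strip (String.ofList current)], op)
  | [ch], depth, current, parts, op =>
    if ch = '(' then pvA_loop [] (depth + 1) (current ++ [ch]) parts op
    else if ch = ')' then pvA_loop [] (depth - 1) (current ++ [ch]) parts op
    else pvA_loop [] depth (current ++ [ch]) parts op
  | ch :: c2 :: rest2, depth, current, parts, op =>
    if ch = '(' then pvA_loop (c2 :: rest2) (depth + 1) (current ++ [ch]) parts op
    else if ch = ')' then pvA_loop (c2 :: rest2) (depth - 1) (current ++ [ch]) parts op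
    else if depth = 0 ∧ (String.ofList [ch, c2] = "||" ∨ String.ofList [ch, c2] = "&&") then
      match op with
      | none =>
        pvA_loop rest2 depth [] (parts ++ [PySem.Str.strip (String.ofList current)])
          (some (String.ofList [ch, c2]))
      | some o0 =>
        if o0 ≠ String.ofList [ch, c2] then none
        else pvA_loop rest2 depth [] (parts ++ [PySem.Str.strip (String.ofList current)]) (some o0)
    else pvA_loop (c2 :: rest2) depth (current ++ [ch]) parts op

def rewrite_negated_compound_py (inner : String) : Option String :=
  let s := PySem.Str.strip inner
  match pvA_loop s.toList 0 [] [] none with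
  | none => none
  | some (parts, op?) =>
    if parts.length < 2 then none
    else
      match op? with
      | none => none
      | some operator =>
        let new_op := if operator = "||" then "&&" else "||"
        let negated := parts.map (fun p =>
          if ¬ (PySem.Str.startswith p "!") then "!(" ++ p ++ ")"
          else PySem.Str.stripChars (PySem.Str.slice p (some 1) none) "()")
        some (PySem.Str.join (" " ++ new_op ++ " ") negated)

-- ===== PORT B =====
-- B's first pass: record each top-level operator position (no part buffer).
def pvB_scan : List Char → Nat → Int → List (Nat × String)
  | [], _, _ => []
  | [ch], i, depth =>
    if ch = '(' then pvB_scan [] (i + 1) (depth + 1)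
    else if ch = ')' then pvB_scan [] (i + 1) (depth - 1)
    else pvB_scan [] (i + 1) depth
  | ch :: c2 :: rest2, i, depth =>
    if ch = '(' then pvB_scan (c2 :: rest2) (i + 1) (depth + 1)
    else if ch = ')' then pvB_scan (c2 :: rest2) (i + 1) (depth - 1)
    else if depth = 0 ∧ (String.ofList [ch, c2] = "||" ∨ String.ofList [ch, c2] = "&&") then
      (i, String.ofList [ch, c2]) :: pvB_scan rest2 (i + 2) depth
    else pvB_scan (c2 :: rest2) (i + 1) depth

def rewrite_negated_compound_py_alt (inner : String) : Option String :=
  let s := PySem.Str.strip inner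
  let n : Int := (PySem.Str.len s : Int)
  let cuts := pvB_scan s.toList 0 0
  match PySem.Set.ofList (cuts.map (·.2)) with
  | [operator] =>
    let bounds : List Int := (-2) :: (cuts.map (fun c => ((c.1 : Int)))) ++ [n]
    let parts := (bounds.zip bounds.tail).map (fun ab =>
      PySem.Str.strip (PySem.Str.slice s (some (ab.1 + 2)) (some ab.2)))
    let new_op := if operator = "||" then "&&" else "||"
    let negated := parts.map (fun p =>
      if ¬ (PySem.Str.startswith p "!") then "!(" ++ p ++ ")"
      else PySem.Str.stripChars (PySem.Str.slice p (some 1) none) "()")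
    some (PySem.Str.join (" " ++ new_op ++ " ") negated)
  | _ => none

-- ===== PRECONDITION & SPEC =====
def Spec_rewrite_negated_compound_py (inner : String) (out : Option String) : Prop := out = rewrite_negated_compound_py_alt inner
instance (inner : String) (out : Option String) : Decidable (Spec_rewrite_negated_compound_py inner out) := by unfold Spec_rewrite_negated_compound_py; infer_instance

-- ===== CLAIM (what is proved, stated in full; the proofs are below) =====
def Claim_equal_rewrite_negated_compound_py : Prop := ∀ (inner : String), Dom_rewrite_negated_compound_py inner → Spec_rewrite_negated_compound_py inner (rewrite_negated_compound_py inner)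

-- ===== LEMMAS AND PROOFS =====

-- A's running operator check, replayed over the list of recorded operators.
def pvFoldOp : Option String → List String → Option (Option String)
  | o, [] => some o
  | none, x :: xs => pvFoldOp (some x) xs
  | some o, x :: xs => if o ≠ x then none else pvFoldOp (some o) xs

-- (start, stop) index pairs of the parts determined by cut positions.
def pvPairs (j : Nat) : List Nat → Nat → List (Nat × Nat)
  | [], n => [(j, n)]
  | p :: ps, n => (j, p) :: pvPairs (p + 2) ps n

def pvSegs (cl : List Char) (prs : List (Nat × Nat)) : List String :=
  prs.map (fun ab => PySem.Str.strip (String.ofList ((cl.drop ab.1).take (ab.2 - ab.1))))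

lemma pv_take_snoc (cl rest : List Char) (ch : Char) (i j : Nat) (hj : j ≤ i)
    (h : cl.drop i = ch :: rest) :
    (cl.drop j).take (i - j) ++ [ch] = (cl.drop j).take (i + 1 - j) := by
  have hch : (cl.drop j)[i - j]? = some ch := by
    rw [List.getElem?_drop]
    have : j + (i - j) = i := by omega
    rw [this]
    have h0 : cl[i]? = (cl.drop i)[0]? := by rw [List.getElem?_drop, Nat.add_zero]
    rw [h0, h]; rfl
  have : i + 1 - j = (i - j) + 1 := by omega
  rw [this, List.take_add_one, hch]; rfl

lemma pv_drop_tail (cl rest : List Char) (ch : Char) (i : Nat)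
    (h : cl.drop i = ch :: rest) : rest = cl.drop (i + 1) := by
  have h2 : (cl.drop i).tail = cl.drop (i + 1) := List.tail_drop
  rw [h, List.tail_cons] at h2
  exact h2

lemma pv_drop_tail2 (cl rest : List Char) (c1 c2 : Char) (i : Nat)
    (h : cl.drop i = c1 :: c2 :: rest) : rest = cl.drop (i + 2) := by
  have h1 : cl.drop (i+1) = c2 :: rest := (pv_drop_tail cl (c2 :: rest) c1 i h).symm
  exact pv_drop_tail cl rest c2 (i+1) h1

theorem pvA_loop_eq (cl : List Char) : ∀ cs depth current parts op i j,
    cs = cl.drop i → j ≤ i → current = (cl.drop j).take (i - j) →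
    pvA_loop cs depth current parts op =
      match pvFoldOp op ((pvB_scan cs i depth).map Prod.snd) with
      | none => none
      | some o =>
        some (parts ++ pvSegs cl (pvPairs j ((pvB_scan cs i depth).map Prod.fst) cl.length), o) := by
  intro cs depth current parts op
  induction cs, depth, current, parts, op using pvA_loop.induct with
  | case1 depth current parts op =>
    intro i j hcs hj hcur
    have hlen : cl.length ≤ i := List.drop_eq_nil_iff.mp hcs.symm
    have : (cl.drop j).take (i - j) = (cl.drop j).take (cl.length - j) := by
      rw [List.take_of_length_le (by simp; omega), List.take_of_length_le (by simp)]
    simp [pvA_loop, pvB_scan, pvFoldOp, pvPairs, pvSegs, hcur, this]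
  | case2 depth current parts op ih =>
    intro i j hcs hj hcur
    have h := hcs.symm
    have hrest : ([] : List Char) = cl.drop (i + 1) := pv_drop_tail cl [] '(' i h
    have hcur1 : current ++ ['('] = (cl.drop j).take (i + 1 - j) := by
      rw [hcur]; exact pv_take_snoc cl [] '(' i j hj h
    have hrec := ih (i + 1) j hrest (by omega) hcur1
    simpa [pvA_loop, pvB_scan] using hrec
  | case3 depth current parts op hne ih =>
    intro i j hcs hj hcur
    have h := hcs.symm
    have hrest : ([] : List Char) = cl.drop (i + 1) := pv_drop_tail cl [] ')' i h
    have hcur1 : current ++ [')'] = (cl.drop j).take (i + 1 - j) := by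
      rw [hcur]; exact pv_take_snoc cl [] ')' i j hj h
    have hrec := ih (i + 1) j hrest (by omega) hcur1
    simpa [pvA_loop, pvB_scan] using hrec
  | case4 ch depth current parts op h1 h2 ih =>
    intro i j hcs hj hcur
    have h := hcs.symm
    have hrest : ([] : List Char) = cl.drop (i + 1) := pv_drop_tail cl [] ch i h
    have hcur1 : current ++ [ch] = (cl.drop j).take (i + 1 - j) := by
      rw [hcur]; exact pv_take_snoc cl [] ch i j hj h
    have hrec := ih (i + 1) j hrest (by omega) hcur1
    simpa [pvA_loop, pvB_scan, h1, h2] using hrec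
  | case5 c2 rest2 depth current parts op ih =>
    intro i j hcs hj hcur
    have h := hcs.symm
    have hrest : ((c2 :: rest2) : List Char) = cl.drop (i + 1) := pv_drop_tail cl (c2 :: rest2) '(' i h
    have hcur1 : current ++ ['('] = (cl.drop j).take (i + 1 - j) := by
      rw [hcur]; exact pv_take_snoc cl (c2 :: rest2) '(' i j hj h
    have hrec := ih (i + 1) j hrest (by omega) hcur1
    simpa [pvA_loop, pvB_scan] using hrec
  | case6 c2 rest2 depth current parts op hne ih =>
    intro i j hcs hj hcur
    have h := hcs.symm
    have hrest : ((c2 :: rest2) : List Char) = cl.drop (i + 1) := pv_drop_tail cl (c2 :: rest2) ')' i h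
    have hcur1 : current ++ [')'] = (cl.drop j).take (i + 1 - j) := by
      rw [hcur]; exact pv_take_snoc cl (c2 :: rest2) ')' i j hj h
    have hrec := ih (i + 1) j hrest (by omega) hcur1
    simpa [pvA_loop, pvB_scan] using hrec
  | case7 ch c2 rest2 depth current parts h1 h2 hop ih =>
    intro i j hcs hj hcur
    have h := hcs.symm
    have hrest : rest2 = cl.drop (i + 2) := pv_drop_tail2 cl rest2 ch c2 i h
    have hih := ih (i + 2) (i + 2) hrest (by omega) (by simp)
    simp only [pvA_loop, pvB_scan, if_neg h1, if_neg h2, if_pos hop]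
    rw [hih]
    cases hfo : pvFoldOp (some (String.ofList [ch, c2]))
        ((pvB_scan rest2 (i + 2) depth).map Prod.snd) with
    | none => simp [pvFoldOp, hfo]
    | some o =>
      simp only [pvFoldOp, List.map_cons, hfo, pvPairs, pvSegs, List.map_cons]
      rw [hcur]
      simp
  | case8 ch c2 rest2 depth current parts h1 h2 hop o0 hne =>
    intro i j hcs hj hcur
    simp only [pvA_loop, pvB_scan, if_neg h1, if_neg h2, if_pos hop, if_pos hne]
    simp [pvFoldOp, if_pos hne]
  | case9 ch c2 rest2 depth current parts h1 h2 hop o0 hne ih =>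
    intro i j hcs hj hcur
    have h := hcs.symm
    have hrest : rest2 = cl.drop (i + 2) := pv_drop_tail2 cl rest2 ch c2 i h
    have hih := ih (i + 2) (i + 2) hrest (by omega) (by simp)
    simp only [pvA_loop, pvB_scan, if_neg h1, if_neg h2, if_pos hop, if_neg hne]
    rw [hih]
    cases hfo : pvFoldOp (some o0) ((pvB_scan rest2 (i + 2) depth).map Prod.snd) with
    | none => simp [pvFoldOp, hfo]
    | some o =>
      simp only [pvFoldOp, List.map_cons, if_neg hne, hfo, pvPairs, pvSegs, List.map_cons]
      rw [hcur]
      simp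
  | case10 ch c2 rest2 depth current parts op h1 h2 h3 ih =>
    intro i j hcs hj hcur
    have h := hcs.symm
    have hrest : ((c2 :: rest2) : List Char) = cl.drop (i + 1) := pv_drop_tail cl (c2 :: rest2) ch i h
    have hcur1 : current ++ [ch] = (cl.drop j).take (i + 1 - j) := by
      rw [hcur]; exact pv_take_snoc cl (c2 :: rest2) ch i j hj h
    have hrec := ih (i + 1) j hrest (by omega) hcur1
    simpa [pvA_loop, pvB_scan, h1, h2, h3] using hrec

lemma pvFoldOp_all (l : List String) (x : String) (h : ∀ y ∈ l, y = x) :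
    pvFoldOp (some x) l = some (some x) := by
  induction l with
  | nil => rfl
  | cons a t ih =>
    have ha : a = x := h a (by simp)
    have ht := ih (fun y hy => h y (List.mem_cons_of_mem _ hy))
    simp [pvFoldOp, ha, ht]

lemma pvFoldOp_mismatch (l : List String) (x : String) (h : ∃ y ∈ l, y ≠ x) :
    pvFoldOp (some x) l = none := by
  induction l with
  | nil => simp at h
  | cons a t ih =>
    by_cases hax : a = x
    · subst hax
      obtain ⟨y, hy, hne⟩ := h
      have hyt : y ∈ t := by
        rcases List.mem_cons.mp hy with h1 | h1
        · exact absurd h1 hne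
        · exact h1
      have := ih ⟨y, hyt, hne⟩
      simp [pvFoldOp, this]
    · have hxa : x ≠ a := fun hh => hax hh.symm
      simp [pvFoldOp, hxa]

lemma pvSet_fold (l : List String) (x : String) (h : ∀ y ∈ l, y = x) :
    List.foldl PySem.Set.add [x] l = [x] := by
  induction l with
  | nil => rfl
  | cons a t ih =>
    have ha : a = x := h a (by simp)
    have ht := ih (fun y hy => h y (List.mem_cons_of_mem _ hy))
    simp only [List.foldl_cons, ha]
    have : PySem.Set.add [x] x = [x] := by simp [PySem.Set.add]
    rw [this, ht]

lemma pvSet_singleton (l : List String) (x : String) (h : ∀ y ∈ l, y = x) :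
    PySem.Set.ofList (x :: l) = [x] := by
  rw [PySem.Set.ofList_eq_foldl, List.foldl_cons]
  have : PySem.Set.add [] x = [x] := by simp [PySem.Set.add]
  rw [this]
  exact pvSet_fold l x h

lemma pvSet_not_singleton (l : List String) (x z : String) (h : ∃ y ∈ l, y ≠ x) :
    PySem.Set.ofList (x :: l) ≠ [z] := by
  intro hS
  obtain ⟨y, hy, hne⟩ := h
  have hx : x ∈ PySem.Set.ofList (x :: l) := (PySem.Set.mem_ofList _ _).mpr (by simp)
  have hyy : y ∈ PySem.Set.ofList (x :: l) := (PySem.Set.mem_ofList _ _).mpr (by simp [hy])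
  rw [hS] at hx hyy
  simp at hx hyy
  exact hne (hyy.trans hx.symm)

lemma pvPairs_length (l : List Nat) : ∀ (j n : Nat), (pvPairs j l n).length = l.length + 1 := by
  induction l with
  | nil => intro j n; rfl
  | cons p ps ih => intro j n; simp [pvPairs, ih]

lemma pvSegs_length (cl : List Char) (l : List Nat) (n : Nat) (j : Nat) :
    (pvSegs cl (pvPairs j l n)).length = l.length + 1 := by
  simp [pvSegs, pvPairs_length]

lemma pvSlice_eq (s : String) (a b : Nat) :
    PySem.Str.slice s (some (a : Int)) (some (b : Int)) =
      String.ofList ((s.toList.drop a).take (b - a)) := by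
  have h : (PySem.Str.slice s (some (a : Int)) (some (b : Int))).toList =
      (s.toList.drop a).take (b - a) := by
    rw [PySem.Str.toList_slice, PySem.Chars.slice_eq_listSlice, PySem.List.slice_natCast]
  rw [← h, String.ofList_toList]

def pvBnd (s : String) (bs : List Int) : List String :=
  (bs.zip bs.tail).map (fun ab => PySem.Str.strip (PySem.Str.slice s (some (ab.1 + 2)) (some ab.2)))

lemma pvParts_eq (s : String) : ∀ (cuts : List (Nat × String)) (j : Nat),
    pvBnd s (((j : Int) - 2) :: (cuts.map (fun c => ((c.1 : Int))) ++ [((s.toList.length : Int))]))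
    = pvSegs s.toList (pvPairs j (cuts.map Prod.fst) s.toList.length) := by
  intro cuts
  induction cuts with
  | nil =>
    intro j
    simp only [pvBnd, List.map_nil, List.nil_append, List.tail_cons, List.zip_cons_cons,
      List.zip_nil_right, List.map_cons, List.map_nil, pvPairs, pvSegs]
    have h1 : ((j : Int) - 2) + 2 = ((j : Nat) : Int) := by ring
    rw [h1, pvSlice_eq]
  | cons p ps ih =>
    intro j
    simp only [pvBnd, List.map_cons, List.cons_append, List.tail_cons, List.zip_cons_cons,
      List.map_cons, pvPairs, pvSegs, List.map_cons]
    refine congrArg₂ List.cons ?_ ?_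
    · have h1 : ((j : Int) - 2) + 2 = ((j : Nat) : Int) := by ring
      rw [h1, pvSlice_eq]
    · have h2 : ((p.1 : Nat) : Int) = (((p.1 + 2 : Nat)) : Int) - 2 := by push_cast; ring
      rw [h2]
      have := ih (p.1 + 2)
      simpa [pvBnd, pvSegs] using this

theorem rewrite_negated_compound_py_spec : Claim_equal_rewrite_negated_compound_py := by
  intro inner _
  unfold Spec_rewrite_negated_compound_py
  unfold rewrite_negated_compound_py rewrite_negated_compound_py_alt
  have hmain := pvA_loop_eq (PySem.Str.strip inner).toList (PySem.Str.strip inner).toList 0 [] []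
    none 0 0 rfl (le_refl 0) (by simp)
  simp only [hmain]
  cases hc : pvB_scan (PySem.Str.strip inner).toList 0 0 with
  | nil =>
    simp [pvFoldOp, pvPairs, pvSegs, PySem.Set.ofList_eq_foldl]
  | cons c cs' =>
    by_cases hall : ∀ y ∈ cs'.map Prod.snd, y = c.2
    · have hfold : pvFoldOp none ((c :: cs').map Prod.snd) = some (some c.2) := by
        simp only [List.map_cons, pvFoldOp]
        exact pvFoldOp_all _ _ hall
      have hset : PySem.Set.ofList ((c :: cs').map Prod.snd) = [c.2] := by
        simp only [List.map_cons]
        exact pvSet_singleton _ _ hall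
      have hlen : ¬ ((pvSegs (PySem.Str.strip inner).toList
          (pvPairs 0 ((c :: cs').map Prod.fst) (PySem.Str.strip inner).toList.length)).length < 2) := by
        rw [pvSegs_length]; simp
      have hparts := pvParts_eq (PySem.Str.strip inner) (c :: cs') 0
      rw [hfold, hset, PySem.Str.len_eq]
      simp only [List.nil_append, if_neg hlen]
      have h0 : (((0:Nat)):Int) - 2 = (-2:Int) := by norm_num
      rw [h0] at hparts
      rw [← hparts]
      rfl
    · push Not at hall
      obtain ⟨y, hy, hne⟩ := hall
      have hfold : pvFoldOp none ((c :: cs').map Prod.snd) = none := by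
        simp only [List.map_cons, pvFoldOp]
        exact pvFoldOp_mismatch _ _ ⟨y, hy, hne⟩
      rw [hfold]
      cases hS : PySem.Set.ofList ((c :: cs').map Prod.snd) with
      | nil => rfl
      | cons z zs =>
        cases zs with
        | nil =>
          exfalso
          exact pvSet_not_singleton _ _ z ⟨y, hy, hne⟩ (by simpa using hS)
        | cons z2 zs2 => rfl
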